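-- pv_equiv track=rewrite | github.com/Ticktakto/Practice_Algorithm | Implementation/pro_moiGosa_my.py | solution
-- ===== SOURCE A (Python) =====
-- def solution(answers):
--
--     step_supo_one = [1,2,3,4,5]
--     step_supo_two = [2,1,2,3,2,4,2,5]
--     step_supo_three = [3,3,1,1,2,2,4,4,5,5]
--
--     correct_one = 0
--     correct_two = 0
--     correct_three = 0
--
--     index = 0
--     for answer in answers:
--         if answer == step_supo_one[index % 5]:
--             correct_one += 1
--         if answer == step_supo_two[index % 8]:
--             correct_two += 1
--         if answer == step_supo_three[index % 10]:
--             correct_three += 1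
--         index += 1
--
--     supo_answer = [correct_one, correct_two, correct_three]
--     max_index = supo_answer.index(max(supo_answer))
--
--     res = [max_index+1]
--     for i in range(3):
--         if i == max_index:
--             continue
--         else:
--             if supo_answer[i] == supo_answer[max_index]:
--                 res.append(i+1)
--     return res
-- ===== SOURCE B (Python) =====
-- def solution(answers):
--     patterns = [[1, 2, 3, 4, 5],
--                 [2, 1, 2, 3, 2, 4, 2, 5],
--                 [3, 3, 1, 1, 2, 2, 4, 4, 5, 5]]
--     # 40 = lcm(5, 8, 10): a position's behaviour against every pattern
--     # depends only on its residue mod 40, so count (residue, answer) pairs once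
--     keys = [(i % 40, a) for i, a in enumerate(answers)]
--     cnt = {}
--     for key in keys:
--         cnt[key] = cnt.get(key, 0) + 1
--     scores = [sum(cnt.get((r, p[r % len(p)]), 0) for r in range(40))
--               for p in patterns]
--     m = max(scores)
--     return [k + 1 for k, s in enumerate(scores) if s == m]
-- ===== Notes on version B (the rewrite author's own statement) =====
-- stated objective: alternative
-- what changed: A compares every answer against all three patterns in one fused loop with three counters and first-max-then-append-ties logic; B never compares answers to patterns element-wise: it builds a histogram of (index mod 40, answer) pairs (40 = lcm of pattern lengths), reads each score off with 40 table lookups, and selects winners by a direct max-filter.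
import Mathlib
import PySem

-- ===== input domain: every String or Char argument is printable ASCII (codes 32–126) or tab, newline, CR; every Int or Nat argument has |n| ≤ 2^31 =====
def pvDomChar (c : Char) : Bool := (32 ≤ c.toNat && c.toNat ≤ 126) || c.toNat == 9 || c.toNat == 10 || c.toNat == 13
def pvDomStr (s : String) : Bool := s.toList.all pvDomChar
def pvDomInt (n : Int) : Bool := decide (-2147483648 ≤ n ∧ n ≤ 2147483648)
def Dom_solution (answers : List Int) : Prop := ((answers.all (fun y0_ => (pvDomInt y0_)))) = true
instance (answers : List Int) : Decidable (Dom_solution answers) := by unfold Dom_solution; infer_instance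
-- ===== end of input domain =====

-- B replaces A's fused comparison loop (three counters, first-max-then-append-ties) by a
-- histogram of (index mod 40, answer) pairs — 40 = lcm of the pattern lengths — from which
-- each score is read off by 40 lookups, winners chosen by a direct max-filter (objective: alternative).

-- ===== PORT A =====
-- A's loop body; state = (correct_one, correct_two, correct_three, index).
def stepA (s : Int × Int × Int × Int) (answer : Int) : Int × Int × Int × Int :=
  let c1 := if answer = PySem.List.pyGetD ([1,2,3,4,5] : List Int) (PySem.Int.mod s.2.2.2 5) 0 then s.1 + 1 else s.1
  let c2 := if answer = PySem.List.pyGetD ([2,1,2,3,2,4,2,5] : List Int) (PySem.Int.mod s.2.2.2 8) 0 then s.2.1 + 1 else s.2.1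
  let c3 := if answer = PySem.List.pyGetD ([3,3,1,1,2,2,4,4,5,5] : List Int) (PySem.Int.mod s.2.2.2 10) 0 then s.2.2.1 + 1 else s.2.2.1
  (c1, c2, c3, s.2.2.2 + 1)

def solution (answers : List Int) : List Int :=
  let st := answers.foldl stepA (0, 0, 0, 0)
  let supo : List Int := [st.1, st.2.1, st.2.2.1]
  -- max on a nonempty literal list and index of a present element: the getD defaults are never used
  let max_index : Nat := (PySem.List.index? supo ((PySem.List.max? supo id).getD 0)).getD 0
  (PySem.List.pyRange 0 3 1).foldl
    (fun res i =>
      if i = (max_index : Int) then res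
      else if PySem.List.pyGetD supo i 0 = PySem.List.pyGetD supo (max_index : Int) 0
        then res ++ [i + 1] else res)
    [(max_index : Int) + 1]

-- ===== PORT B =====
def solution_alt (answers : List Int) : List Int :=
  let patterns : List (List Int) :=
    [[1,2,3,4,5], [2,1,2,3,2,4,2,5], [3,3,1,1,2,2,4,4,5,5]]
  -- keys = [(i % 40, a) for i, a in enumerate(answers)]
  let keys : List (Int × Int) :=
    (PySem.List.enumerate answers).map (fun ia => (PySem.Int.mod ia.1 40, ia.2))
  -- cnt[key] = cnt.get(key, 0) + 1
  let cnt : PySem.Dict (Int × Int) Int :=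
    keys.foldl (fun d key => d.insert key (d.getD key 0 + 1)) PySem.Dict.empty
  let scores : List Int := patterns.map (fun p =>
    ((PySem.List.pyRange 0 40 1).map
      (fun r => cnt.getD (r, PySem.List.pyGetD p (PySem.Int.mod r (p.length : Int)) 0) 0)).sum)
  -- max on a nonempty literal list: the getD default is never used
  let m : Int := (PySem.List.max? scores id).getD 0
  ((PySem.List.enumerate scores).filter (fun is => is.2 == m)).map (fun is => is.1 + 1)

-- ===== PRECONDITION & SPEC =====
def Spec_solution (answers : List Int) (out : List Int) : Prop := out = solution_alt answers
instance (answers : List Int) (out : List Int) : Decidable (Spec_solution answers out) := by unfold Spec_solution; infer_instance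

-- ===== CLAIM (what is proved, stated in full; the proofs are below) =====
def Claim_equal_solution : Prop := ∀ (answers : List Int), Dom_solution answers → Spec_solution answers (solution answers)

-- ===== LEMMAS AND PROOFS =====

-- running score of pattern p over the remaining answers, starting at absolute index k
def scoreFrom (p : List Int) (k : Int) : List Int → Int
  | [] => 0
  | a :: t =>
      (if a = PySem.List.pyGetD p (PySem.Int.mod k (p.length : Int)) 0 then (1 : Int) else 0)
      + scoreFrom p (k + 1) t

lemma foldl_stepA (answers : List Int) (c1 c2 c3 k : Int) :
    answers.foldl stepA (c1, c2, c3, k)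
      = (c1 + scoreFrom [1,2,3,4,5] k answers,
         c2 + scoreFrom [2,1,2,3,2,4,2,5] k answers,
         c3 + scoreFrom [3,3,1,1,2,2,4,4,5,5] k answers,
         k + answers.length) := by
  induction answers generalizing c1 c2 c3 k with
  | nil => simp [scoreFrom]
  | cons a t ih =>
      simp only [List.foldl_cons, stepA, ih, scoreFrom, List.length_cons]
      simp only [Prod.mk.injEq]
      norm_num
      refine ⟨by split_ifs <;> ring, by split_ifs <;> ring, by split_ifs <;> ring, by ring⟩

-- a sum of 0/1 indicators 'this residue is m and the pattern value there is a' over distinct residues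
lemma sum_ind_zero_of_not_mem (rs : List Int) (pv : Int → Int) (m a : Int) (hm : m ∉ rs) :
    (rs.map (fun r => if m = r ∧ a = pv r then (1 : Int) else 0)).sum = 0 := by
  induction rs with
  | nil => simp
  | cons r t ih =>
      simp only [List.mem_cons, not_or] at hm
      simp [hm.1, ih hm.2]

lemma sum_ind_of_mem (rs : List Int) (pv : Int → Int) (m a : Int)
    (hnd : rs.Nodup) (hm : m ∈ rs) :
    (rs.map (fun r => if m = r ∧ a = pv r then (1 : Int) else 0)).sum
      = if a = pv m then 1 else 0 := by
  induction rs with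
  | nil => cases hm
  | cons r t ih =>
      rcases List.mem_cons.mp hm with h | h
      · subst h
        have hnt : m ∉ t := (List.nodup_cons.mp hnd).1
        simp [sum_ind_zero_of_not_mem t pv m a hnt]
      · have hne : m ≠ r := fun hh => (List.nodup_cons.mp hnd).1 (hh ▸ h)
        simp only [List.map_cons, List.sum_cons, hne, false_and, if_false, zero_add]
        exact ih (List.nodup_cons.mp hnd).2 h

-- the histogram score: counts of (r, p[r % len p]) summed over r = 0..39
def histScore (p : List Int) (keys : List (Int × Int)) : Int :=
  ((PySem.List.pyRange 0 40 1).map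
    (fun r => ((keys.count (r, PySem.List.pyGetD p (PySem.Int.mod r (p.length : Int)) 0) : Nat) : Int))).sum

lemma histScore_nil (p : List Int) : histScore p [] = 0 := by
  simp [histScore]

lemma histScore_cons (p : List Int) (m a : Int) (keys : List (Int × Int)) :
    histScore p ((m, a) :: keys)
      = histScore p keys
        + ((PySem.List.pyRange 0 40 1).map
            (fun r => if m = r ∧ a = PySem.List.pyGetD p (PySem.Int.mod r (p.length : Int)) 0
                      then (1 : Int) else 0)).sum := by
  unfold histScore
  rw [← PySem.List.sum_map_add_int]
  refine congrArg List.sum (List.map_congr_left fun r _ => ?_)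
  by_cases h : m = r ∧ a = PySem.List.pyGetD p (PySem.Int.mod r (p.length : Int)) 0
  · obtain ⟨h1, h2⟩ := h
    subst h1; subst h2
    simp
  · have : ¬ (((m, a) : Int × Int) = (r, PySem.List.pyGetD p (PySem.Int.mod r (p.length : Int)) 0)) := by
      simpa [Prod.ext_iff] using h
    simp [this, h]

-- |p| divides 40 → the pattern value at residue (k % 40) is the pattern value at k
lemma pv_mod40 (p : List Int) (k : Int) (hp : (0 : Int) < (p.length : Int))
    (hd : (p.length : Int) ∣ 40) :
    PySem.List.pyGetD p (PySem.Int.mod (PySem.Int.mod k 40) (p.length : Int)) 0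
      = PySem.List.pyGetD p (PySem.Int.mod k (p.length : Int)) 0 := by
  have h40 : (0 : Int) < 40 := by norm_num
  rw [PySem.Int.mod_eq_emod_of_pos h40, PySem.Int.mod_eq_emod_of_pos hp,
      PySem.Int.mod_eq_emod_of_pos hp, Int.emod_emod_of_dvd k hd]

-- core: the histogram score of the keys of (enumerate answers k) is scoreFrom p k answers
lemma histScore_enumerate (p : List Int) (hp : (0 : Int) < (p.length : Int))
    (hd : (p.length : Int) ∣ 40) (answers : List Int) (k : Int) :
    histScore p ((PySem.List.enumerate answers k).map (fun ia => (PySem.Int.mod ia.1 40, ia.2)))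
      = scoreFrom p k answers := by
  induction answers generalizing k with
  | nil => simp [PySem.List.enumerate, histScore_nil, scoreFrom]
  | cons a t ih =>
      rw [PySem.List.enumerate_cons, List.map_cons, histScore_cons, ih (k + 1)]
      have h40 : (0 : Int) < 40 := by norm_num
      have hmem : PySem.Int.mod k 40 ∈ PySem.List.pyRange 0 40 1 :=
        (PySem.List.mem_pyRange_one).mpr ⟨PySem.Int.mod_nonneg k h40, PySem.Int.mod_lt k h40⟩
      rw [sum_ind_of_mem _ _ _ _ (PySem.List.nodup_pyRange_one 0 40) hmem, pv_mod40 p k hp hd]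
      simp [scoreFrom]
      ring

-- the post-loop tie logic of A agrees with B's max-filter, for arbitrary scores
lemma tails_eq (s1 s2 s3 : Int) :
    (let supo : List Int := [s1, s2, s3]
     let max_index : Nat := (PySem.List.index? supo ((PySem.List.max? supo id).getD 0)).getD 0
     (PySem.List.pyRange 0 3 1).foldl
       (fun res i =>
         if i = (max_index : Int) then res
         else if PySem.List.pyGetD supo i 0 = PySem.List.pyGetD supo (max_index : Int) 0
           then res ++ [i + 1] else res)
       [(max_index : Int) + 1])
    = (let scores : List Int := [s1, s2, s3]
       let m : Int := (PySem.List.max? scores id).getD 0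
       ((PySem.List.enumerate scores).filter (fun is => is.2 == m)).map (fun is => is.1 + 1)) := by
  have hr : PySem.List.pyRange 0 3 1 = [0,1,2] := by decide
  by_cases h1 : s1 < s2
  · by_cases h3 : s2 < s3
    · have e1 : s1 ≠ s3 := by omega
      have e2 : s2 ≠ s3 := by omega
      have hm : (PySem.List.max? [s1,s2,s3] id).getD 0 = s3 := by simp [PySem.List.max?, h1, h3]
      have hidx : (List.idxOf? s3 [s1,s2,s3]).getD 0 = 2 := by
        simp [List.idxOf?, List.findIdx?_cons, e1, e2]
      simp [hr, hm, hidx, PySem.List.enumerate, PySem.List.pyGetD, PySem.List.pyGet?,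
            PySem.List.pyIdx?, e1, e2]
    · have e1 : s1 ≠ s2 := by omega
      have hm : (PySem.List.max? [s1,s2,s3] id).getD 0 = s2 := by simp [PySem.List.max?, h1, h3]
      have hidx : (List.idxOf? s2 [s1,s2,s3]).getD 0 = 1 := by
        simp [List.idxOf?, List.findIdx?_cons, e1]
      simp [hr, hm, hidx, PySem.List.enumerate, PySem.List.pyGetD, PySem.List.pyGet?,
            PySem.List.pyIdx?, e1]
      split_ifs <;> simp_all
  · by_cases h2 : s1 < s3
    · have e1 : s1 ≠ s3 := by omega
      have e2 : s2 ≠ s3 := by omega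
      have hm : (PySem.List.max? [s1,s2,s3] id).getD 0 = s3 := by simp [PySem.List.max?, h1, h2]
      have hidx : (List.idxOf? s3 [s1,s2,s3]).getD 0 = 2 := by
        simp [List.idxOf?, List.findIdx?_cons, e1, e2]
      simp [hr, hm, hidx, PySem.List.enumerate, PySem.List.pyGetD, PySem.List.pyGet?,
            PySem.List.pyIdx?, e1, e2]
    · have hm : (PySem.List.max? [s1,s2,s3] id).getD 0 = s1 := by simp [PySem.List.max?, h1, h2]
      have hidx : (List.idxOf? s1 [s1,s2,s3]).getD 0 = 0 := by
        simp [List.idxOf?, List.findIdx?_cons]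
      simp [hr, hm, hidx, PySem.List.enumerate, PySem.List.pyGetD, PySem.List.pyGet?,
            PySem.List.pyIdx?]
      split_ifs <;> simp_all

theorem solution_spec_aux (answers : List Int) :
    solution answers = solution_alt answers := by
  unfold solution solution_alt
  have hcnt : ∀ (keys : List (Int × Int)) (v : Int × Int),
      (keys.foldl (fun d key => d.insert key (d.getD key 0 + 1)) PySem.Dict.empty).getD v 0
        = ((keys.count v : Nat) : Int) := by
    intro keys v
    rw [PySem.Dict.getD_foldl_insert_add_one]
    simp [PySem.Dict.getD_empty]
  simp only [hcnt]
  have hs : ∀ p : List Int, 0 < p.length → (p.length : Int) ∣ 40 →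
      ((PySem.List.pyRange 0 40 1).map
        (fun r => ((((PySem.List.enumerate answers).map (fun ia => (PySem.Int.mod ia.1 40, ia.2))).count
            (r, PySem.List.pyGetD p (PySem.Int.mod r (p.length : Int)) 0) : Nat) : Int))).sum
        = scoreFrom p 0 answers := by
    intro p hp hd
    exact histScore_enumerate p (by exact_mod_cast hp) hd answers 0
  simp only [foldl_stepA, List.map_cons, List.map_nil, zero_add]
  rw [hs [1,2,3,4,5] (by norm_num) (by norm_num), hs [2,1,2,3,2,4,2,5] (by norm_num) (by norm_num),
      hs [3,3,1,1,2,2,4,4,5,5] (by norm_num) (by norm_num)]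
  exact tails_eq _ _ _

-- ===== VERDICT (by name: the statement is the Claim_ definition above) =====
theorem solution_spec : Claim_equal_solution := by
  intro answers _
  unfold Spec_solution
  exact solution_spec_aux answers
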